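-- pv_equiv track=rewrite | github.com/MlLearnerAkash/YOLOv11-track-ReID | object_in_out3.py | find_repetitive_values
-- ===== SOURCE A (Python) =====
-- def find_repetitive_values(data):
--     value_to_keys = {}  # Dictionary to map values to the keys they appear in
--     repetitive_values = {}  # Store values that appear in multiple keys
--
--     for key, values in data.items():
--         for value in values:
--             if value in value_to_keys:
--                 value_to_keys[value].append(key)
--                 repetitive_values[value] = value_to_keys[value]  # Store only if repeated
--             else:
--                 value_to_keys[value] = [key]
--
--     return repetitive_values if repetitive_values else None
-- ===== SOURCE B (Python) =====
-- def find_repetitive_values(data):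
--     # Brute force without a hash index: flatten to an occurrence stream, flag each value at
--     # its second occurrence (one earlier occurrence in the prefix), collect its keys by scan.
--     stream = [(k, v) for k, vs in data.items() for v in vs]
--     values = [v for _, v in stream]
--     result = {}
--     for i, (k, v) in enumerate(stream):
--         if values[:i].count(v) == 1:  # exactly this position is v's second occurrence
--             result[v] = [kk for kk, vv in stream if vv == v]
--     return result or None
-- ===== Notes on version B (the rewrite author's own statement) =====
-- stated objective: alternative
-- what changed: B drops A's incrementally maintained value->keys hash index entirely: it flattens the dict to a positional occurrence stream, flags each value exactly at its second occurrence by counting it in the prefix slice, and gathers that value's full key list by a scan of the stream; A instead grows per-value key lists in a dict and mirrors them into a second result dict as it goes.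
import Mathlib
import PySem

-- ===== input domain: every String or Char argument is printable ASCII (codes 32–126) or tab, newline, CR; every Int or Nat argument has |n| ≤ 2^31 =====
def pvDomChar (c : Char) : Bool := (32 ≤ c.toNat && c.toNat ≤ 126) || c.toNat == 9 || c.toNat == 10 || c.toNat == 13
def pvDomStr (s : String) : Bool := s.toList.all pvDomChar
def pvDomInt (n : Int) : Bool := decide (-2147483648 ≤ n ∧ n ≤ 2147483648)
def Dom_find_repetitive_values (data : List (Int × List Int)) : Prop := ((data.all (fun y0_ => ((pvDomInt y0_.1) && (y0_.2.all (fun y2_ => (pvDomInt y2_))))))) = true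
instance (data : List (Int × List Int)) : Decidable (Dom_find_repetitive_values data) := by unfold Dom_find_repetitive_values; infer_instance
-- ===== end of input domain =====

-- B replaces A's incremental value->keys hash index by a dict-free brute-force scan over the
-- flattened occurrence stream (quadratic, not faster); equal return values, no observable mutation.

-- ===== PORT A =====
-- state: (value_to_keys, repetitive_values); 'repetitive_values[value] = value_to_keys[value]'
-- aliases the SAME list in Python, so after later appends the stored list is the full key list:
-- here both dicts are therefore updated with the new list ks'.
def find_repetitive_values (data : List (Int × List Int)) : Option (List (Int × List Int)) :=
  let st := data.foldl (fun st kv =>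
      kv.2.foldl (fun (st : PySem.Dict Int (List Int) × PySem.Dict Int (List Int)) v =>
        match st.1.get? v with
        | some ks =>
            let ks' := ks ++ [v |> fun _ => kv.1]
            (st.1.insert v ks', st.2.insert v ks')
        | none => (st.1.insert v [kv.1], st.2)) st)
    ((PySem.Dict.empty, PySem.Dict.empty) :
      PySem.Dict Int (List Int) × PySem.Dict Int (List Int))
  if st.2.items.isEmpty then none else some st.2.items

-- ===== PORT B =====
-- Source B: stream = flattened [(key, value)] occurrence list; values[:i] is the prefix slice
-- (i ≥ 0 from enumerate, so slice is exact); the comprehension over stream collects v's keys.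
def find_repetitive_values_alt (data : List (Int × List Int)) : Option (List (Int × List Int)) :=
  let stream := data.flatMap (fun kv => kv.2.map (fun v => (kv.1, v)))
  let values := stream.map (fun p => p.2)
  let result := (PySem.List.enumerate stream).foldl
    (fun (r : PySem.Dict Int (List Int)) p =>
      if (PySem.List.slice values none (some p.1)).count p.2.2 == 1 then
        r.insert p.2.2 ((stream.filter (fun q => q.2 == p.2.2)).map (fun q => q.1))
      else r) PySem.Dict.empty
  if result.items.isEmpty then none else some result.items

-- ===== PRECONDITION & SPEC =====
def Spec_find_repetitive_values (data : List (Int × List Int)) (out : Option (List (Int × List Int))) : Prop := out = find_repetitive_values_alt data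
instance (data : List (Int × List Int)) (out : Option (List (Int × List Int))) : Decidable (Spec_find_repetitive_values data out) := by unfold Spec_find_repetitive_values; infer_instance

-- ===== CLAIM (what is proved, stated in full; the proofs are below) =====
def Claim_equal_find_repetitive_values : Prop := ∀ (data : List (Int × List Int)), Dom_find_repetitive_values data → Spec_find_repetitive_values data (find_repetitive_values data)

-- ===== LEMMAS AND PROOFS =====

-- the flattened (key, value) occurrence stream both programs conceptually walk
def pvStream (data : List (Int × List Int)) : List (Int × Int) :=
  data.flatMap (fun kv => kv.2.map (fun v => (kv.1, v)))

-- number of occurrences of value v in l, and the keys of those occurrences in order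
def pvCnt (l : List (Int × Int)) (v : Int) : Nat := l.countP (fun q => q.2 == v)
def pvKeys (l : List (Int × Int)) (v : Int) : List Int :=
  (l.filter (fun q => q.2 == v)).map (fun q => q.1)

-- the values of l in the order of their SECOND occurrence, given already-seen prefix a
def pvOrd (a l : List (Int × Int)) : List Int :=
  match l with
  | [] => []
  | p :: rest => if pvCnt a p.2 = 1 then p.2 :: pvOrd (a ++ [p]) rest
                 else pvOrd (a ++ [p]) rest

theorem pvCnt_append (l m : List (Int × Int)) (v : Int) :
    pvCnt (l ++ m) v = pvCnt l v + pvCnt m v := by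
  simp [pvCnt, List.countP_append]

theorem pvCnt_singleton (p : Int × Int) (v : Int) :
    pvCnt [p] v = if p.2 = v then 1 else 0 := by
  by_cases h : p.2 = v <;> simp [pvCnt, h]

theorem length_pvKeys (l : List (Int × Int)) (v : Int) :
    (pvKeys l v).length = pvCnt l v := by
  simp [pvKeys, pvCnt, List.countP_eq_length_filter]

theorem pvKeys_append (l m : List (Int × Int)) (v : Int) :
    pvKeys (l ++ m) v = pvKeys l v ++ pvKeys m v := by
  simp [pvKeys, List.filter_append]

theorem pvKeys_singleton (p : Int × Int) (v : Int) :
    pvKeys [p] v = if p.2 = v then [p.1] else [] := by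
  by_cases h : p.2 = v <;> simp [pvKeys, h]

theorem pvCnt_map_snd (l : List (Int × Int)) (v : Int) :
    (l.map (fun p => p.2)).count v = pvCnt l v := by
  simp [pvCnt, List.count_eq_countP, List.countP_map, Function.comp_def]

theorem pvOrd_append_singleton (a l : List (Int × Int)) (p : Int × Int) :
    pvOrd a (l ++ [p]) =
      pvOrd a l ++ (if pvCnt (a ++ l) p.2 = 1 then [p.2] else []) := by
  induction l generalizing a with
  | nil => simp [pvOrd]
  | cons q rest ih =>
      have hass : (a ++ [q]) ++ rest = a ++ q :: rest := by simp
      simp only [List.cons_append, pvOrd, ih (a ++ [q]), hass]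
      split_ifs <;> simp

theorem mem_pvOrd (a l : List (Int × Int)) (w : Int) :
    w ∈ pvOrd a l ↔ 2 ≤ pvCnt (a ++ l) w ∧ pvCnt a w ≤ 1 := by
  induction l generalizing a with
  | nil => simp [pvOrd]; omega
  | cons p rest ih =>
      have htot : pvCnt (a ++ p :: rest) w = pvCnt a w + pvCnt [p] w + pvCnt rest w := by
        rw [show a ++ p :: rest = (a ++ [p]) ++ rest from by simp, pvCnt_append, pvCnt_append]
      have hee : pvCnt (a ++ [p] ++ rest) w = pvCnt a w + pvCnt [p] w + pvCnt rest w := by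
        rw [pvCnt_append, pvCnt_append]
      have hps : pvCnt (a ++ [p]) w = pvCnt a w + pvCnt [p] w := pvCnt_append a [p] w
      by_cases hw : w = p.2
      · have hp1 : pvCnt [p] w = 1 := by rw [pvCnt_singleton, if_pos hw.symm]
        simp only [pvOrd]
        split_ifs with hc
        · have hc' : pvCnt a w = 1 := by rw [hw]; exact hc
          simp only [List.mem_cons, ih (a ++ [p]), hee, htot, hps, hp1]
          constructor
          · intro _; exact ⟨by omega, by omega⟩
          · intro _; exact Or.inl hw
        · have hc' : pvCnt a w ≠ 1 := by rw [hw]; exact hc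
          rw [ih (a ++ [p]), hee, htot, hps, hp1]
          omega
      · have hp0 : pvCnt [p] w = 0 := by rw [pvCnt_singleton, if_neg (fun he => hw he.symm)]
        simp only [pvOrd]
        split_ifs with hc
        · simp only [List.mem_cons, hw, false_or, ih (a ++ [p]), hee, htot, hps, hp0]
          omega
        · rw [ih (a ++ [p]), hee, htot, hps, hp0]
          omega

-- A's loop body over one occurrence
def pvStepA (st : PySem.Dict Int (List Int) × PySem.Dict Int (List Int)) (p : Int × Int) :
    PySem.Dict Int (List Int) × PySem.Dict Int (List Int) :=
  match st.1.get? p.2 with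
  | some ks =>
      let ks' := ks ++ [p.1]
      (st.1.insert p.2 ks', st.2.insert p.2 ks')
  | none => (st.1.insert p.2 [p.1], st.2)

theorem pv_nested_eq_stream_A (data : List (Int × List Int))
    (st : PySem.Dict Int (List Int) × PySem.Dict Int (List Int)) :
    data.foldl (fun st kv =>
      kv.2.foldl (fun (st : PySem.Dict Int (List Int) × PySem.Dict Int (List Int)) v =>
        match st.1.get? v with
        | some ks =>
            let ks' := ks ++ [v |> fun _ => kv.1]
            (st.1.insert v ks', st.2.insert v ks')
        | none => (st.1.insert v [kv.1], st.2)) st) st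
      = (pvStream data).foldl pvStepA st := by
  induction data generalizing st with
  | nil => rfl
  | cons kv rest ih =>
      simp only [List.foldl_cons, pvStream, List.flatMap_cons, List.foldl_append, List.foldl_map]
      rw [ih]
      rfl

-- invariant after A has consumed the prefix `pre` of the stream
def pvInvA (pre : List (Int × Int))
    (st : PySem.Dict Int (List Int) × PySem.Dict Int (List Int)) : Prop :=
  (∀ v, st.1.get? v = if pvCnt pre v = 0 then none else some (pvKeys pre v)) ∧
  st.2.items = (pvOrd [] pre).map (fun w => (w, pvKeys pre w))

theorem pv_stepA_inv (pre : List (Int × Int)) (p : Int × Int)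
    (st : PySem.Dict Int (List Int) × PySem.Dict Int (List Int))
    (h : pvInvA pre st) : pvInvA (pre ++ [p]) (pvStepA st p) := by
  obtain ⟨h1, h2⟩ := h
  have hkeys : st.2.keys = pvOrd [] pre := by
    simp only [PySem.Dict.keys, h2, List.map_map]
    exact (List.map_congr_left fun w _ => rfl).trans (List.map_id' _)
  have hKp : ∀ w, pvKeys (pre ++ [p]) w = pvKeys pre w ++ (if p.2 = w then [p.1] else []) := by
    intro w; rw [pvKeys_append, pvKeys_singleton]
  have hCp : ∀ w, pvCnt (pre ++ [p]) w = pvCnt pre w + (if p.2 = w then 1 else 0) := by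
    intro w; rw [pvCnt_append, pvCnt_singleton]
  have hordmem : ∀ w, w ∈ pvOrd [] pre ↔ 2 ≤ pvCnt pre w := by
    intro w
    rw [mem_pvOrd]
    simp [pvCnt]
  cases hget : st.1.get? p.2 with
  | none =>
      have hc0 : pvCnt pre p.2 = 0 := by
        have := h1 p.2
        rw [hget] at this
        by_contra hne
        simp [hne] at this
      have hA : pvStepA st p = (st.1.insert p.2 [p.1], st.2) := by
        simp [pvStepA, hget]
      rw [hA]
      constructor
      · intro v
        rw [PySem.Dict.get?_insert, hCp v]
        by_cases hv : v = p.2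
        · subst hv
          have hkp : pvKeys (pre ++ [p]) p.2 = [p.1] := by
            have h0 : (pvKeys pre p.2).length = 0 := by rw [length_pvKeys]; omega
            rw [pvKeys_append, pvKeys_singleton, if_pos rfl,
              List.length_eq_zero_iff.mp h0]
            simp
          simp [hc0, hkp]
        · have hpv : p.2 ≠ v := fun he => hv he.symm
          simp only [if_neg hv, h1 v, if_neg hpv]
          rw [hKp v, if_neg hpv]
          simp
      · have hord : pvOrd [] (pre ++ [p]) = pvOrd [] pre := by
          rw [pvOrd_append_singleton]
          simp [hc0]
        rw [hord, h2]
        refine List.map_congr_left (fun w hw => ?_)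
        have : p.2 ≠ w := by
          intro he
          have h2 := (hordmem w).mp hw
          rw [he] at hc0
          omega
        rw [hKp w, if_neg this]
        simp
  | some ks =>
      have hcpos : pvCnt pre p.2 ≠ 0 ∧ ks = pvKeys pre p.2 := by
        have := h1 p.2
        rw [hget] at this
        by_cases hz : pvCnt pre p.2 = 0
        · simp [hz] at this
        · simp [hz] at this
          exact ⟨hz, this⟩
      obtain ⟨hz, rfl⟩ := hcpos
      have hA : pvStepA st p
          = (st.1.insert p.2 (pvKeys pre p.2 ++ [p.1]),
             st.2.insert p.2 (pvKeys pre p.2 ++ [p.1])) := by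
        simp [pvStepA, hget]
      rw [hA]
      have hKp2 : pvKeys (pre ++ [p]) p.2 = pvKeys pre p.2 ++ [p.1] := by
        rw [hKp p.2]; simp
      constructor
      · intro v
        rw [PySem.Dict.get?_insert, hCp v]
        by_cases hv : v = p.2
        · subst hv
          simp [hKp2]

        · have hpv : p.2 ≠ v := fun he => hv he.symm
          simp only [if_neg hv, h1 v, if_neg hpv]
          rw [hKp v, if_neg hpv]
          simp
      · by_cases h1c : pvCnt pre p.2 = 1
        · -- second occurrence: both the order list and the result dict gain p.2
          have hnm : p.2 ∉ pvOrd [] pre := by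
            rw [hordmem]; omega
          have hcon : st.2.contains p.2 = false := by
            rw [PySem.Dict.contains_eq_decide_mem_keys, hkeys]
            simp [hnm]
          rw [PySem.Dict.items_insert_of_not_contains _ _ hcon, h2]
          have hord : pvOrd [] (pre ++ [p]) = pvOrd [] pre ++ [p.2] := by
            rw [pvOrd_append_singleton]
            simp [h1c]
          rw [hord, List.map_append]
          congr 1
          · refine List.map_congr_left (fun w hw => ?_)
            have : p.2 ≠ w := fun he => hnm (he ▸ hw)
            rw [hKp w, if_neg this]; simp
          · simp [hKp2]
        · -- already repeated: the entry is overwritten in place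
          have hm : p.2 ∈ pvOrd [] pre := by
            rw [hordmem]; omega
          have hcon : st.2.contains p.2 = true := by
            rw [PySem.Dict.contains_eq_decide_mem_keys, hkeys]
            simp [hm]
          rw [PySem.Dict.items_insert_of_contains _ _ hcon, h2]
          have hord : pvOrd [] (pre ++ [p]) = pvOrd [] pre := by
            rw [pvOrd_append_singleton]
            simp [h1c]
          rw [hord, List.map_map]
          refine List.map_congr_left (fun w hw => ?_)
          by_cases hwv : w = p.2
          · subst hwv
            simp [Function.comp, hKp2]
          · have : p.2 ≠ w := fun he => hwv he.symm
            simp [Function.comp, show (w == p.2) = false by simp [hwv], hKp w, this]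

theorem pv_foldA (rest pre : List (Int × Int))
    (st : PySem.Dict Int (List Int) × PySem.Dict Int (List Int))
    (h : pvInvA pre st) : pvInvA (pre ++ rest) (rest.foldl pvStepA st) := by
  induction rest generalizing pre st with
  | nil => simpa using h
  | cons p rest ih =>
      have := ih (pre ++ [p]) (pvStepA st p) (pv_stepA_inv pre p st h)
      simpa using this

-- B's loop body over one enumerated occurrence of the fixed stream
def pvStepB (stream : List (Int × Int)) (r : PySem.Dict Int (List Int))
    (p : Int × Int × Int) : PySem.Dict Int (List Int) :=
  if (PySem.List.slice (stream.map (fun q => q.2)) none (some p.1)).count p.2.2 == 1 then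
    r.insert p.2.2 ((stream.filter (fun q => q.2 == p.2.2)).map (fun q => q.1))
  else r

theorem pv_foldB (rest pre stream : List (Int × Int)) (hs : stream = pre ++ rest)
    (r : PySem.Dict Int (List Int))
    (hr : r.items = (pvOrd [] pre).map (fun w => (w, pvKeys stream w))) :
    ((PySem.List.enumerate rest (pre.length : Int)).foldl (pvStepB stream) r).items
      = (pvOrd [] stream).map (fun w => (w, pvKeys stream w)) := by
  induction rest generalizing pre r with
  | nil =>
      simp only [PySem.List.enumerate_nil, List.foldl_nil]
      rw [hr]
      simp [hs]
  | cons p rest ih =>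
      rw [PySem.List.enumerate_cons, List.foldl_cons]
      have hcond : (PySem.List.slice (stream.map (fun q => q.2)) none
          (some ((pre.length : Nat) : Int))).count p.2 = pvCnt pre p.2 := by
        rw [PySem.List.slice_to_natCast]
        have : (stream.map (fun q => q.2)).take pre.length = pre.map (fun q => q.2) := by
          rw [hs, List.map_append, List.take_append_of_le_length (by simp)]
          simp
        rw [this, pvCnt_map_snd]
      have hkeysB : (stream.filter (fun q => q.2 == p.2)).map (fun q => q.1)
          = pvKeys stream p.2 := rfl
      have hordmem : ∀ w, w ∈ pvOrd [] pre ↔ 2 ≤ pvCnt pre w := by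
        intro w; rw [mem_pvOrd]; simp [pvCnt]
      have hrkeys : r.keys = pvOrd [] pre := by
        simp only [PySem.Dict.keys, hr, List.map_map]
        exact (List.map_congr_left fun w _ => rfl).trans (List.map_id' _)
      have hlen : ((pre.length : Int) + 1) = (((pre ++ [p]).length : Nat) : Int) := by
        simp
      by_cases h1c : pvCnt pre p.2 = 1
      · have hstep : pvStepB stream r ((pre.length : Int), p)
            = r.insert p.2 (pvKeys stream p.2) := by
          simp only [pvStepB, hcond, hkeysB, h1c]
          rfl
        rw [hstep, hlen]
        refine ih (pre ++ [p]) (by simpa using hs) _ ?_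
        have hnm : p.2 ∉ pvOrd [] pre := by rw [hordmem]; omega
        have hcon : r.contains p.2 = false := by
          rw [PySem.Dict.contains_eq_decide_mem_keys, hrkeys]
          simp [hnm]
        rw [PySem.Dict.items_insert_of_not_contains _ _ hcon, hr]
        rw [pvOrd_append_singleton]
        simp [h1c]
      · have hstep : pvStepB stream r ((pre.length : Int), p) = r := by
          simp only [pvStepB, hcond]
          simp [h1c]
        rw [hstep, hlen]
        refine ih (pre ++ [p]) (by simpa using hs) _ ?_
        rw [hr, pvOrd_append_singleton]
        simp [h1c]

theorem pv_foldB' (data : List (Int × List Int)) :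
    ((PySem.List.enumerate (pvStream data)).foldl
      (fun (r : PySem.Dict Int (List Int)) p =>
        if (PySem.List.slice ((pvStream data).map (fun p => p.2)) none (some p.1)).count p.2.2 == 1 then
          r.insert p.2.2 (((pvStream data).filter (fun q => q.2 == p.2.2)).map (fun q => q.1))
        else r) PySem.Dict.empty).items
      = (pvOrd [] (pvStream data)).map (fun w => (w, pvKeys (pvStream data) w)) :=
  pv_foldB (pvStream data) [] (pvStream data) rfl PySem.Dict.empty rfl

-- ===== VERDICT (by name: the statement is the Claim_ definition above) =====
theorem find_repetitive_values_spec : Claim_equal_find_repetitive_values := by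
  intro data _
  unfold Spec_find_repetitive_values find_repetitive_values find_repetitive_values_alt
  rw [pv_nested_eq_stream_A]
  have h0 : pvInvA [] ((PySem.Dict.empty, PySem.Dict.empty) :
      PySem.Dict Int (List Int) × PySem.Dict Int (List Int)) := by
    constructor
    · intro v; simp [PySem.Dict.get?_empty, pvCnt]
    · rfl
  obtain ⟨_, hA⟩ := pv_foldA (pvStream data) [] _ h0
  simp only [List.nil_append] at hA
  have hstream : data.flatMap (fun kv => kv.2.map (fun v => (kv.1, v))) = pvStream data := rfl
  simp only [hstream, hA, pv_foldB' data]
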